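-- pv_equiv track=rewrite | github.com/masterman331/Transparent-Classroom-Picker | shuffle_engine.py | chunk_into_tables
-- ===== SOURCE A (Python) =====
-- def chunk_into_tables(lst, num_tables, seats_per_table):
--     chart = []; idx = 0
--     for t in range(num_tables):
--         table = []
--         for s in range(seats_per_table):
--             table.append(lst[idx] if idx < len(lst) else "Empty Seat")
--             idx += 1
--         chart.append(table)
--     return chart
-- ===== SOURCE B (Python) =====
-- def chunk_into_tables(lst, num_tables, seats_per_table):
--     total = max(num_tables, 0) * max(seats_per_table, 0)
--     padded = list(lst[:total]) + ["Empty Seat"] * (total - len(lst))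
--     return [padded[t * seats_per_table:(t + 1) * seats_per_table]
--             for t in range(num_tables)]
-- ===== Notes on version B (the rewrite author's own statement) =====
-- stated objective: simpler
-- what changed: B replaces A's nested per-seat loop with a running index counter by a pad-then-reshape decomposition: build one flat list (lst truncated to the table capacity, padded with 'Empty Seat') and cut it into tables by slicing.
import Mathlib
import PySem

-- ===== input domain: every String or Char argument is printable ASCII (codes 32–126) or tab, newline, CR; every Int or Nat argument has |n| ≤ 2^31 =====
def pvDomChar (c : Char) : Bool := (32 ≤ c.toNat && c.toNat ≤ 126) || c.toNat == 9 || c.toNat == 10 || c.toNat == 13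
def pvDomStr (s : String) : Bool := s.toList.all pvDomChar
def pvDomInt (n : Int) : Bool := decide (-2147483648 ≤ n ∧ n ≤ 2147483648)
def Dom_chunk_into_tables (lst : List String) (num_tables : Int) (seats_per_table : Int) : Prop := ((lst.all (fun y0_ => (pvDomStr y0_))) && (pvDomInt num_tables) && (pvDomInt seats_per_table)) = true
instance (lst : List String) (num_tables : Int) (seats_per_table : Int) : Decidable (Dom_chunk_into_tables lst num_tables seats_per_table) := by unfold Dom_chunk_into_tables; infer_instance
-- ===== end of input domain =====

-- B builds the chart by padding the flat list to capacity and slicing it into tables,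
-- instead of A's nested loop with a per-seat conditional and running index (objective: simpler).

-- ===== PORT A =====
def chunk_into_tables (lst : List String) (num_tables : Int) (seats_per_table : Int) : List (List String) :=
  -- chart = []; idx = 0; for t in range(num_tables): for s in range(seats_per_table): …
  (((PySem.List.pyRange 0 num_tables 1).foldl
      (fun (st : List (List String) × Int) (_t : Int) =>
        let inner :=
          (PySem.List.pyRange 0 seats_per_table 1).foldl
            (fun (ti : List String × Int) (_s : Int) =>
              (ti.1 ++ [if ti.2 < (lst.length : Int) then PySem.List.pyGetD lst ti.2 "Empty Seat" else "Empty Seat"],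
               ti.2 + 1))
            ([], st.2)
        (st.1 ++ [inner.1], inner.2))
      ([], 0)).1)

-- ===== PORT B =====
def chunk_into_tables_alt (lst : List String) (num_tables : Int) (seats_per_table : Int) : List (List String) :=
  -- total = max(num_tables,0)*max(seats_per_table,0); padded = lst[:total] + ["Empty Seat"]*(total-len(lst))
  let total : Int := max num_tables 0 * max seats_per_table 0
  let padded : List String :=
    PySem.List.slice lst none (some total) ++ List.replicate (total - (lst.length : Int)).toNat "Empty Seat"
  (PySem.List.pyRange 0 num_tables 1).map
    (fun t => PySem.List.slice padded (some (t * seats_per_table)) (some ((t + 1) * seats_per_table)))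

-- ===== PRECONDITION & SPEC =====
def Spec_chunk_into_tables (lst : List String) (num_tables : Int) (seats_per_table : Int) (out : List (List String)) : Prop := out = chunk_into_tables_alt lst num_tables seats_per_table
instance (lst : List String) (num_tables : Int) (seats_per_table : Int) (out : List (List String)) : Decidable (Spec_chunk_into_tables lst num_tables seats_per_table out) := by unfold Spec_chunk_into_tables; infer_instance

-- ===== CLAIM (what is proved, stated in full; the proofs are below) =====
def Claim_equal_chunk_into_tables : Prop := ∀ (lst : List String) (num_tables : Int) (seats_per_table : Int), Dom_chunk_into_tables lst num_tables seats_per_table → Spec_chunk_into_tables lst num_tables seats_per_table (chunk_into_tables lst num_tables seats_per_table)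

-- ===== LEMMAS AND PROOFS =====

/-- A fold that appends `e idx` and advances the counter by `c`, over any list,
    is the map of `e` over the arithmetic progression. -/
lemma foldl_emit {α : Type} (e : Int → α) (c : Int) :
    ∀ (L : List Int) (acc : List α) (i0 : Int),
      L.foldl (fun st (_ : Int) => (st.1 ++ [e st.2], st.2 + c)) (acc, i0)
        = (acc ++ (List.range L.length).map (fun (k : Nat) => e (i0 + (k : Int) * c)), i0 + (L.length : Int) * c) := by
  intro L
  induction L with
  | nil => intro acc i0; simp
  | cons x tl ih =>
    intro acc i0
    simp only [List.foldl_cons]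
    rw [ih]
    simp only [Prod.mk.injEq, List.length_cons]
    constructor
    · rw [List.range_succ_eq_map]
      simp only [List.map_cons, List.map_map, Nat.cast_zero, zero_mul, add_zero,
        List.append_assoc, List.singleton_append]
      refine congrArg (fun l => acc ++ e i0 :: l) ?_
      apply List.map_congr_left
      intro k _
      simp only [Function.comp_apply]
      congr 1
      push_cast
      ring
    · push_cast
      ring

/-- A window of a list as a map over `List.range`. -/
lemma take_drop_window {α : Type} (d : α) (xs : List α) (a s : Nat)
    (h : a + s ≤ xs.length) :
    (xs.drop a).take s = (List.range s).map (fun k => xs.getD (a + k) d) := by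
  apply List.ext_getElem
  · simp only [List.length_take, List.length_drop, List.length_map, List.length_range]
    omega
  · intro i h1 h2
    simp only [List.length_take, List.length_drop] at h1
    simp only [List.getElem_take, List.getElem_drop, List.getElem_map, List.getElem_range]
    rw [List.getD_eq_getElem _ _ (by omega : a + i < xs.length)]

/-- The padded flat list is the map of the "seat at i" function over `range T`. -/
lemma padded_eq {α : Type} (d : α) (xs : List α) (T : Nat) :
    xs.take T ++ List.replicate (T - xs.length) d
      = (List.range T).map (fun i => if i < xs.length then xs.getD i d else d) := by
  apply List.ext_getElem
  · simp only [List.length_append, List.length_take, List.length_replicate, List.length_map,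
      List.length_range]
    omega
  · intro i h1 h2
    simp only [List.length_append, List.length_take, List.length_replicate] at h1
    simp only [List.length_map, List.length_range] at h2
    simp only [List.getElem_map, List.getElem_range]
    by_cases hx : i < xs.length
    · rw [if_pos hx, List.getElem_append_left (by simp; omega)]
      rw [List.getElem_take, List.getD_eq_getElem _ _ hx]
    · rw [if_neg hx, List.getElem_append_right (by simp; omega)]
      simp [List.getElem_replicate]

/-- Any slice of the empty list is empty. -/
lemma slice_nil {α : Type} (a b : Option Int) : PySem.List.slice ([] : List α) a b = [] := by
  rw [List.eq_nil_iff_forall_not_mem]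
  intro x hx
  exact absurd (PySem.List.mem_of_mem_slice _ a b hx) List.not_mem_nil

/-- `foldl_emit` for a step function given pointwise. -/
lemma foldl_emit' {α : Type} (f : List α × Int → Int → List α × Int) (e : Int → α) (c : Int)
    (hf : ∀ st t, f st t = (st.1 ++ [e st.2], st.2 + c)) (L : List Int) (acc : List α) (i0 : Int) :
    L.foldl f (acc, i0)
      = (acc ++ (List.range L.length).map (fun (k : Nat) => e (i0 + (k : Int) * c)), i0 + (L.length : Int) * c) := by
  have hfe : f = fun st (_ : Int) => (st.1 ++ [e st.2], st.2 + c) := by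
    funext st t; exact hf st t
  rw [hfe]
  exact foldl_emit e c L acc i0

-- ===== VERDICT (by name: the statement is the Claim_ definition above) =====
theorem chunk_into_tables_spec : Claim_equal_chunk_into_tables := by
  intro lst nt spt _
  show chunk_into_tables lst nt spt = chunk_into_tables_alt lst nt spt
  unfold chunk_into_tables chunk_into_tables_alt
  by_cases hnt : nt ≤ 0
  · rw [PySem.List.pyRange_one_eq_nil hnt]
    simp
  push_neg at hnt
  by_cases hspt : spt ≤ 0
  · -- no seats per table: every table is empty, and the padded list is empty
    rw [PySem.List.pyRange_one_eq_nil hspt]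
    simp only [List.foldl_nil]
    rw [foldl_emit' _ (fun (_ : Int) => ([] : List String)) 0 (by intro st t; simp)]
    have htot : max nt 0 * max spt 0 = 0 := by
      rw [max_eq_right hspt, mul_zero]
    rw [htot]
    have hpad : PySem.List.slice lst none (some 0) ++
        List.replicate ((0 - (lst.length : Int)).toNat) "Empty Seat" = [] := by
      rw [PySem.List.slice_to lst (by omega : (0:Int) ≤ 0)]
      simp
    rw [hpad]
    simp [slice_nil, PySem.List.pyRange_one, List.map_map, Function.comp_def, List.map_const']
  push_neg at hspt
  -- main case: 0 < nt, 0 < spt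
  obtain ⟨n, hn⟩ : ∃ n : Nat, (n : Int) = nt := ⟨nt.toNat, Int.toNat_of_nonneg (by omega)⟩
  obtain ⟨s, hs⟩ : ∃ s : Nat, (s : Int) = spt := ⟨spt.toNat, Int.toNat_of_nonneg (by omega)⟩
  subst hn hs
  set g : Nat → String := fun i => if i < lst.length then lst.getD i "Empty Seat" else "Empty Seat"
    with hg
  set eI : Int → String :=
    fun i => if i < (lst.length : Int) then PySem.List.pyGetD lst i "Empty Seat" else "Empty Seat"
    with heI
  -- A's nested loops, flattened twice by `foldl_emit'`
  rw [foldl_emit' _ (fun i => (List.range s).map (fun (k : Nat) => eI (i + (k : Int) * 1))) ((s : Int))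
      (by intro st t
          rw [foldl_emit' _ eI 1 (by intro ti u; rw [heI]) _ [] st.2]
          simp [PySem.List.length_pyRange_one])]
  simp only [List.nil_append, PySem.List.length_pyRange_one, Int.sub_zero, Int.toNat_natCast]
  -- B's padded list, as a map over `range (n*s)`
  have htot : max (n : Int) 0 * max (s : Int) 0 = ((n * s : Nat) : Int) := by
    rw [max_eq_left (by positivity), max_eq_left (by positivity)]; push_cast; ring
  rw [htot, PySem.List.slice_to_natCast]
  have hrep : (((n * s : Nat) : Int) - (lst.length : Int)).toNat = n * s - lst.length := by omega
  rw [hrep, padded_eq, PySem.List.pyRange_one, List.map_map]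
  simp only [Int.sub_zero, Int.toNat_natCast]
  apply List.map_congr_left
  intro t ht
  rw [List.mem_range] at ht
  simp only [Function.comp_apply]
  -- reduce B's slice to a window of the padded map
  have h1 : ((0 : Int) + (t : Int)) * (s : Int) = ((t * s : Nat) : Int) := by push_cast; ring
  have h2 : ((0 : Int) + (t : Int) + 1) * (s : Int) = (((t + 1) * s : Nat) : Int) := by
    push_cast; ring
  rw [h1, h2, PySem.List.slice_natCast]
  have hlen : t * s + s ≤ ((List.range (n * s)).map g).length := by
    simp only [List.length_map, List.length_range]
    calc t * s + s = (t + 1) * s := by ring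
    _ ≤ n * s := Nat.mul_le_mul_right s (by omega)
  have hsub : (t + 1) * s - t * s = s := by
    have : (t + 1) * s = t * s + s := by ring
    omega
  rw [hsub, take_drop_window "Empty Seat" _ _ _ hlen]
  -- pointwise: the seat at absolute index t*s+k
  apply List.map_congr_left
  intro k hk
  rw [List.mem_range] at hk
  have hidx : t * s + k < n * s := by
    calc t * s + k < (t + 1) * s := by nlinarith
    _ ≤ n * s := Nat.mul_le_mul_right s (by omega)
  have hmget : ((List.range (n * s)).map g).getD (t * s + k) "Empty Seat" = g (t * s + k) := by
    rw [List.getD_eq_getElem _ _ (by simpa using hidx)]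
    simp
  rw [hmget, hg, heI]
  have harg : ((0 : Int) + (t : Int) * (s : Int) + (k : Int) * 1) = ((t * s + k : Nat) : Int) := by
    push_cast; ring
  simp only [harg]
  by_cases hlt : t * s + k < lst.length
  · rw [if_pos (by exact_mod_cast hlt), if_pos hlt,
      PySem.List.pyGetD_of_nonneg lst _ (by positivity)]
    have h3 : ((t : Int) * (s : Int) + (k : Int)).toNat = t * s + k := by
      have h4 : (t : Int) * (s : Int) + (k : Int) = ((t * s + k : Nat) : Int) := by
        push_cast; ring
      rw [h4, Int.toNat_natCast]
    simp [h3]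
  · rw [if_neg (by exact_mod_cast hlt), if_neg hlt]
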